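-- pv_equiv track=rewrite | github.com/PatelTheKanu/adventofcode | 2025/day9/ans.py | getRestrictedCoords
-- ===== SOURCE A (Python) =====
-- def getRangeOfNums(n1,n2):
--     if n1 < n2:
--         return range(n1, n2+1)
--     return range(n2, n1+1)
--
-- def getLineCoords(p,q):
--     if p[0] == q[0]:
--         r = getRangeOfNums(p[1], q[1])
--         return [(p[0], n) for n in r]
--     elif p[1] == q[1]:
--         r = getRangeOfNums(p[0], q[0])
--         return [(n, p[1]) for n in r]
--     else:
--         return []
--
-- def getRestrictedCoords(coords):
--     permiterCoords = []
--
--     prevCoord = coords[-1]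
--     for coord in coords:
--         for c in getLineCoords(prevCoord, coord):
--             permiterCoords.append(c)
--         prevCoord = coord
--
--     areaCoords = set()
--     for i in range(len(permiterCoords)):
--         ci = permiterCoords[i]
--         for j in range(i, len(permiterCoords)):
--             cj = permiterCoords[j]
--             for c in getLineCoords(ci, cj):
--                 areaCoords.add(c)
--
--     return areaCoords.union(set(permiterCoords))
-- ===== SOURCE B (Python) =====
-- def _line(p, q):
--     if p[0] == q[0]:
--         lo, hi = min(p[1], q[1]), max(p[1], q[1])
--         return [(p[0], t) for t in range(lo, hi + 1)]
--     if p[1] == q[1]: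
--         lo, hi = min(p[0], q[0]), max(p[0], q[0])
--         return [(t, p[1]) for t in range(lo, hi + 1)]
--     return []
--
-- def getRestrictedCoords(coords):
--     perimeter = [c for p, q in zip(coords[-1:] + coords[:-1], coords) for c in _line(p, q)]
--     seen = set()
--     suffix = perimeter
--     while suffix:
--         (x, y), suffix = suffix[0], suffix[1:]
--         seen.add((x, y))
--         ylo = yhi = y
--         xlo = xhi = x
--         for (xj, yj) in suffix:
--             if xj == x:
--                 if yj > yhi:
--                     for t in range(yhi + 1, yj + 1):
--                         seen.add((x, t))
--                     yhi = yj
--                 elif yj < ylo: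
--                     for t in range(yj, ylo):
--                         seen.add((x, t))
--                     ylo = yj
--             elif yj == y:
--                 if xj > xhi:
--                     for t in range(xhi + 1, xj + 1):
--                         seen.add((t, y))
--                     xhi = xj
--                 elif xj < xlo:
--                     for t in range(xj, xlo):
--                         seen.add((t, y))
--                     xlo = xj
--     return seen
-- ===== Notes on version B (the rewrite author's own statement) =====
-- stated objective: faster
-- what changed: A expands the full cell segment between every aligned pair of perimeter points (triple loop over all pairs times segment length); B makes one pass per perimeter point keeping a growing covered interval per axis and emits only the not-yet-covered delta cells, so each fill cell is generated O(1) times per anchor point instead of once per pair.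
import Mathlib
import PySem

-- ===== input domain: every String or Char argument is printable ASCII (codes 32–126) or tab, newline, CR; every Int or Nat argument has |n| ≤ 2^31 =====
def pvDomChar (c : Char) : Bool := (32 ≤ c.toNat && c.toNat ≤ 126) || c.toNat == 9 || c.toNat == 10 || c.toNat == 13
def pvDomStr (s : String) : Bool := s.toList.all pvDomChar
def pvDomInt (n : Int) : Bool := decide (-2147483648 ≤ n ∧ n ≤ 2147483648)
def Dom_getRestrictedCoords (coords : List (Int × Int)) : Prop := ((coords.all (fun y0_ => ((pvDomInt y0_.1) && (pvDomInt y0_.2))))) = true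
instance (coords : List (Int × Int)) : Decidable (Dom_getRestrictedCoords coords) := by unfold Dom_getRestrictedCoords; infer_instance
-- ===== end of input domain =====

-- B replaces A's pairwise full-segment expansion by per-anchor covered-interval growth that emits
-- only the not-yet-covered delta cells; same returned set value, neither program mutates its argument.

-- ===== PORT A =====
def pvRangeA (n1 n2 : Int) : List Int :=
  if n1 < n2 then PySem.List.pyRange n1 (n2 + 1) 1 else PySem.List.pyRange n2 (n1 + 1) 1

def pvLineA (p q : Int × Int) : List (Int × Int) :=
  if p.1 = q.1 then (pvRangeA p.2 q.2).map (fun n => (p.1, n))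
  else if p.2 = q.2 then (pvRangeA p.1 q.1).map (fun n => (n, p.2))
  else []

def getRestrictedCoords (coords : List (Int × Int)) : List (Int × Int) :=
  let per := (coords.foldl
      (fun (st : List (Int × Int) × (Int × Int)) coord =>
        ((pvLineA st.2 coord).foldl (fun l c => l ++ [c]) st.1, coord))
      ([], PySem.List.pyGetD coords (-1) (0, 0))).1
  let area := (PySem.List.pyRange 0 (per.length : Int) 1).foldl
      (fun (s : PySem.Set (Int × Int)) i =>
        let ci := PySem.List.pyGetD per i (0, 0)
        (PySem.List.pyRange i (per.length : Int) 1).foldl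
          (fun s j =>
            let cj := PySem.List.pyGetD per j (0, 0)
            (pvLineA ci cj).foldl PySem.Set.add s) s)
      PySem.Set.empty
  PySem.Set.union area (PySem.Set.ofList per)

-- ===== PORT B =====
def pvLineB (p q : Int × Int) : List (Int × Int) :=
  if p.1 = q.1 then
    (PySem.List.pyRange (min p.2 q.2) (max p.2 q.2 + 1) 1).map (fun t => (p.1, t))
  else if p.2 = q.2 then
    (PySem.List.pyRange (min p.1 q.1) (max p.1 q.1 + 1) 1).map (fun t => (t, p.2))
  else []

def pvFillStep (x y : Int) (st : PySem.Set (Int × Int) × Int × Int × Int × Int)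
    (q : Int × Int) : PySem.Set (Int × Int) × Int × Int × Int × Int :=
  if q.1 = x then
    if q.2 > st.2.2.1 then
      ((PySem.List.pyRange (st.2.2.1 + 1) (q.2 + 1) 1).foldl
        (fun s t => PySem.Set.add s (x, t)) st.1, st.2.1, q.2, st.2.2.2.1, st.2.2.2.2)
    else if q.2 < st.2.1 then
      ((PySem.List.pyRange q.2 st.2.1 1).foldl
        (fun s t => PySem.Set.add s (x, t)) st.1, q.2, st.2.2.1, st.2.2.2.1, st.2.2.2.2)
    else st
  else if q.2 = y then
    if q.1 > st.2.2.2.2 then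
      ((PySem.List.pyRange (st.2.2.2.2 + 1) (q.1 + 1) 1).foldl
        (fun s t => PySem.Set.add s (t, y)) st.1, st.2.1, st.2.2.1, st.2.2.2.1, q.1)
    else if q.1 < st.2.2.2.1 then
      ((PySem.List.pyRange q.1 st.2.2.2.1 1).foldl
        (fun s t => PySem.Set.add s (t, y)) st.1, st.2.1, st.2.2.1, q.1, st.2.2.2.2)
    else st
  else st

def pvFill : List (Int × Int) → PySem.Set (Int × Int) → PySem.Set (Int × Int)
  | [], s => s
  | (x, y) :: suffix, s =>
      pvFill suffix
        (suffix.foldl (pvFillStep x y) (PySem.Set.add s (x, y), y, y, x, x)).1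

def getRestrictedCoords_alt (coords : List (Int × Int)) : List (Int × Int) :=
  let per := ((PySem.List.slice coords (some (-1)) none ++
      PySem.List.slice coords none (some (-1))).zip coords).flatMap
      (fun pq => pvLineB pq.1 pq.2)
  pvFill per PySem.Set.empty

-- ===== PRECONDITION & SPEC =====
-- Pre_ excludes exactly the empty list, on which A raises IndexError at coords[-1].
def Pre_getRestrictedCoords (coords : List (Int × Int)) : Prop := coords ≠ []
instance (coords : List (Int × Int)) : Decidable (Pre_getRestrictedCoords coords) := by
  unfold Pre_getRestrictedCoords; infer_instance
def pvWitness_getRestrictedCoords : (List (Int × Int)) := [((0 : Int), (0 : Int)), (2, 0), (2, 1), (0, 1)]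

def Spec_getRestrictedCoords (coords : List (Int × Int)) (out : List (Int × Int)) : Prop :=
  out = getRestrictedCoords_alt coords
instance (coords : List (Int × Int)) (out : List (Int × Int)) :
    Decidable (Spec_getRestrictedCoords coords out) := by
  unfold Spec_getRestrictedCoords; infer_instance

-- ===== CLAIM (what is proved, stated in full; the proofs are below) =====
def Claim_equal_getRestrictedCoords : Prop := ∀ (coords : List (Int × Int)), Dom_getRestrictedCoords coords → Pre_getRestrictedCoords coords → Spec_getRestrictedCoords coords (getRestrictedCoords coords)

-- ===== LEMMAS AND PROOFS =====
lemma pvRange_minmax (a b : Int) : pvRangeA a b = PySem.List.pyRange (min a b) (max a b + 1) 1 := by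
  unfold pvRangeA
  rcases lt_or_ge a b with h | h
  · rw [if_pos h, min_eq_left h.le, max_eq_right h.le]
  · rw [if_neg (not_lt.mpr h), min_eq_right h, max_eq_left h]

lemma pvLine_eq (p q : Int × Int) : pvLineA p q = pvLineB p q := by
  unfold pvLineA pvLineB
  rw [pvRange_minmax, pvRange_minmax]

lemma perA_fold (cs : List (Int × Int)) (acc : List (Int × Int)) (p : Int × Int) :
    (cs.foldl (fun (st : List (Int × Int) × (Int × Int)) coord =>
        (st.1 ++ pvLineA st.2 coord, coord)) (acc, p)).1
      = acc ++ ((p :: cs).zip cs).flatMap (fun pq => pvLineA pq.1 pq.2) := by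
  induction cs generalizing acc p with
  | nil => simp
  | cons c cs ih => simp [ih, List.zip_cons_cons]

lemma zip_take {α β : Type} (xs : List α) (ys : List β) :
    (xs.take ys.length).zip ys = xs.zip ys := by
  induction xs generalizing ys with
  | nil => simp
  | cons x xs ih =>
      cases ys with
      | nil => simp
      | cons y ys => simp [ih]

lemma zip_cons_dropLast {α : Type} (p : α) (l : List α) :
    (p :: l.dropLast).zip l = (p :: l).zip l := by
  conv_rhs => rw [← zip_take (p :: l) l]
  cases l with
  | nil => simp
  | cons c cs => simp [List.dropLast_eq_take]

lemma drop_pred_eq_getLast {α : Type} (l : List α) (h : l ≠ []) :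
    l.drop (l.length - 1) = [l.getLast h] := by
  induction l with
  | nil => cases h rfl
  | cons c cs ih =>
      cases cs with
      | nil => simp
      | cons d ds => simpa [List.getLast] using ih (by simp)

def stepA (ci : Int × Int) (s : PySem.Set (Int × Int)) (cj : Int × Int) :
    PySem.Set (Int × Int) := (pvLineA ci cj).foldl PySem.Set.add s

def outerA : List (Int × Int) → PySem.Set (Int × Int) → PySem.Set (Int × Int)
  | [], s => s
  | ci :: rest, s => outerA rest ((ci :: rest).foldl (stepA ci) s)

lemma inner_idx (per : List (Int × Int)) (k : Nat) (ci : Int × Int)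
    (s : PySem.Set (Int × Int)) :
    (PySem.List.pyRange (k : Int) (per.length : Int) 1).foldl
        (fun s j => (pvLineA ci (PySem.List.pyGetD per j (0, 0))).foldl PySem.Set.add s) s
      = (per.drop k).foldl (stepA ci) s := by
  have := PySem.List.foldl_pyRange_pyGetD' (xs := per) (a := (k : Int)) (d := ((0 : Int), (0 : Int)))
    (f := fun s cj => (pvLineA ci cj).foldl PySem.Set.add s) (init := s) (by positivity)
  simpa [stepA] using this

lemma outer_idx (per : List (Int × Int)) (k : Nat) (hk : k ≤ per.length)
    (s : PySem.Set (Int × Int)) :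
    (PySem.List.pyRange (k : Int) (per.length : Int) 1).foldl
        (fun s i =>
          (PySem.List.pyRange i (per.length : Int) 1).foldl
            (fun s j => (pvLineA (PySem.List.pyGetD per i (0, 0))
                (PySem.List.pyGetD per j (0, 0))).foldl PySem.Set.add s) s) s
      = outerA (per.drop k) s := by
  induction hn : per.length - k generalizing k s with
  | zero =>
      have hk' : (per.length : Int) ≤ (k : Int) := by exact_mod_cast Nat.le_of_sub_eq_zero hn
      rw [PySem.List.pyRange_one_eq_nil hk']
      have : per.drop k = [] := List.drop_eq_nil_of_le (by omega)
      simp [this, outerA]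
  | succ n ih =>
      have hklt : k < per.length := by omega
      rw [PySem.List.pyRange_one_cons (by exact_mod_cast hklt)]
      rw [List.foldl_cons]
      have hdrop : per.drop k = per[k] :: per.drop (k + 1) := List.drop_eq_getElem_cons hklt
      have hget : PySem.List.pyGetD per (k : Int) ((0:Int),(0:Int)) = per[k] := by
        simp [List.getD, hklt]
      rw [hget, inner_idx per k per[k] s, hdrop]
      have hcast : ((k : Int) + 1) = ((k + 1 : Nat) : Int) := by push_cast; ring
      rw [hcast, ih (k+1) (by omega) _ (by omega)]
      rw [outerA, ← hdrop]

lemma foldl_add_of_mem {β : Type} (l : List β) (f : β → Int × Int)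
    (s : PySem.Set (Int × Int)) (h : ∀ t ∈ l, f t ∈ s) :
    l.foldl (fun s t => PySem.Set.add s (f t)) s = s := by
  induction l with
  | nil => rfl
  | cons t l ih =>
      rw [List.foldl_cons, PySem.Set.add_of_mem (h t (by simp))]
      exact ih (fun t ht => h t (by simp [ht]))

lemma block_eq (x y : Int) (rest : List (Int × Int)) :
    ∀ (s : PySem.Set (Int × Int)) (ylo yhi xlo xhi : Int),
      ylo ≤ y → y ≤ yhi → xlo ≤ x → x ≤ xhi →
      (∀ t, ylo ≤ t → t ≤ yhi → (x, t) ∈ s) →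
      (∀ t, xlo ≤ t → t ≤ xhi → (t, y) ∈ s) →
      rest.foldl (stepA (x, y)) s = (rest.foldl (pvFillStep x y) (s, ylo, yhi, xlo, xhi)).1 := by
  induction rest with
  | nil => intro s ylo yhi xlo xhi _ _ _ _ _ _; rfl
  | cons q rest ih =>
      intro s ylo yhi xlo xhi hyl hyh hxl hxh hsy hsx
      obtain ⟨xj, yj⟩ := q
      rw [List.foldl_cons, List.foldl_cons]
      by_cases hx : xj = x
      · subst hx
        have hstepA : stepA (xj, y) s (xj, yj)
            = (PySem.List.pyRange (min y yj) (max y yj + 1) 1).foldl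
                (fun s t => PySem.Set.add s (xj, t)) s := by
          simp [stepA, pvLineA, pvRange_minmax, List.foldl_map]
        by_cases h1 : yj > yhi
        · have hmin : min y yj = y := min_eq_left (by omega)
          have hmax : max y yj = yj := max_eq_right (by omega)
          have hsplit : PySem.List.pyRange y (yj + 1) 1
              = PySem.List.pyRange y (yhi + 1) 1 ++ PySem.List.pyRange (yhi + 1) (yj + 1) 1 :=
            PySem.List.pyRange_one_append y (yhi + 1) (yj + 1) (by omega) (by omega)
          have hB : pvFillStep xj y (s, ylo, yhi, xlo, xhi) (xj, yj)
              = ((PySem.List.pyRange (yhi + 1) (yj + 1) 1).foldl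
                  (fun s t => PySem.Set.add s (xj, t)) s, ylo, yj, xlo, xhi) := by
            simp [pvFillStep, h1]
          rw [hstepA, hmin, hmax, hsplit, List.foldl_append,
            foldl_add_of_mem (PySem.List.pyRange y (yhi + 1) 1) (fun t => (xj, t)) s
              (fun t ht => by
              rw [PySem.List.mem_pyRange_one] at ht
              exact hsy t (by omega) (by omega)), hB]
          apply ih _ ylo yj xlo xhi hyl (by omega) hxl hxh
          · intro t htl hth
            rw [PySem.Set.mem_foldl_add]
            by_cases hc : t ≤ yhi
            · exact Or.inl (hsy t htl hc)
            · exact Or.inr ⟨t, PySem.List.mem_pyRange_one.mpr ⟨by omega, by omega⟩, rfl⟩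
          · intro t htl hth
            rw [PySem.Set.mem_foldl_add]
            exact Or.inl (hsx t htl hth)
        · by_cases h2 : yj < ylo
          · have hmin : min y yj = yj := min_eq_right (by omega)
            have hmax : max y yj = y := max_eq_left (by omega)
            have hsplit : PySem.List.pyRange yj (y + 1) 1
                = PySem.List.pyRange yj ylo 1 ++ PySem.List.pyRange ylo (y + 1) 1 :=
              PySem.List.pyRange_one_append yj ylo (y + 1) (by omega) (by omega)
            have hB : pvFillStep xj y (s, ylo, yhi, xlo, xhi) (xj, yj)
                = ((PySem.List.pyRange yj ylo 1).foldl
                    (fun s t => PySem.Set.add s (xj, t)) s, yj, yhi, xlo, xhi) := by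
              simp [pvFillStep, h1, h2]
            rw [hstepA, hmin, hmax, hsplit, List.foldl_append,
              foldl_add_of_mem (PySem.List.pyRange ylo (y + 1) 1) (fun t => (xj, t)) _
                (fun t ht => by
                rw [PySem.List.mem_pyRange_one] at ht
                rw [PySem.Set.mem_foldl_add]
                exact Or.inl (hsy t (by omega) (by omega))), hB]
            apply ih _ yj yhi xlo xhi (by omega) hyh hxl hxh
            · intro t htl hth
              rw [PySem.Set.mem_foldl_add]
              by_cases hc : ylo ≤ t
              · exact Or.inl (hsy t hc hth)
              · exact Or.inr ⟨t, PySem.List.mem_pyRange_one.mpr ⟨by omega, by omega⟩, rfl⟩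
            · intro t htl hth
              rw [PySem.Set.mem_foldl_add]
              exact Or.inl (hsx t htl hth)
          · have hB : pvFillStep xj y (s, ylo, yhi, xlo, xhi) (xj, yj)
                = (s, ylo, yhi, xlo, xhi) := by
              simp [pvFillStep, h1, h2]
            rw [hstepA, foldl_add_of_mem (PySem.List.pyRange (min y yj) (max y yj + 1) 1)
              (fun t => (xj, t)) s (fun t ht => by
              rw [PySem.List.mem_pyRange_one] at ht
              rcases le_total y yj with hc | hc
              · rw [min_eq_left hc, max_eq_right hc] at ht
                exact hsy t (by omega) (by omega)
              · rw [min_eq_right hc, max_eq_left hc] at ht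
                exact hsy t (by omega) (by omega)), hB]
            exact ih s ylo yhi xlo xhi hyl hyh hxl hxh hsy hsx
      · by_cases hy : yj = y
        · subst hy
          have hstepA : stepA (x, yj) s (xj, yj)
              = (PySem.List.pyRange (min x xj) (max x xj + 1) 1).foldl
                  (fun s t => PySem.Set.add s (t, yj)) s := by
            simp [stepA, pvLineA, pvRange_minmax, List.foldl_map, Ne.symm hx]
          by_cases h1 : xj > xhi
          · have hmin : min x xj = x := min_eq_left (by omega)
            have hmax : max x xj = xj := max_eq_right (by omega)
            have hsplit : PySem.List.pyRange x (xj + 1) 1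
                = PySem.List.pyRange x (xhi + 1) 1 ++ PySem.List.pyRange (xhi + 1) (xj + 1) 1 :=
              PySem.List.pyRange_one_append x (xhi + 1) (xj + 1) (by omega) (by omega)
            have hB : pvFillStep x yj (s, ylo, yhi, xlo, xhi) (xj, yj)
                = ((PySem.List.pyRange (xhi + 1) (xj + 1) 1).foldl
                    (fun s t => PySem.Set.add s (t, yj)) s, ylo, yhi, xlo, xj) := by
              simp [pvFillStep, hx, h1]
            rw [hstepA, hmin, hmax, hsplit, List.foldl_append,
              foldl_add_of_mem (PySem.List.pyRange x (xhi + 1) 1) (fun t => (t, yj)) s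
                (fun t ht => by
                rw [PySem.List.mem_pyRange_one] at ht
                exact hsx t (by omega) (by omega)), hB]
            apply ih _ ylo yhi xlo xj hyl hyh hxl (by omega)
            · intro t htl hth
              rw [PySem.Set.mem_foldl_add]
              exact Or.inl (hsy t htl hth)
            · intro t htl hth
              rw [PySem.Set.mem_foldl_add]
              by_cases hc : t ≤ xhi
              · exact Or.inl (hsx t htl hc)
              · exact Or.inr ⟨t, PySem.List.mem_pyRange_one.mpr ⟨by omega, by omega⟩, rfl⟩
          · by_cases h2 : xj < xlo
            · have hmin : min x xj = xj := min_eq_right (by omega)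
              have hmax : max x xj = x := max_eq_left (by omega)
              have hsplit : PySem.List.pyRange xj (x + 1) 1
                  = PySem.List.pyRange xj xlo 1 ++ PySem.List.pyRange xlo (x + 1) 1 :=
                PySem.List.pyRange_one_append xj xlo (x + 1) (by omega) (by omega)
              have hB : pvFillStep x yj (s, ylo, yhi, xlo, xhi) (xj, yj)
                  = ((PySem.List.pyRange xj xlo 1).foldl
                      (fun s t => PySem.Set.add s (t, yj)) s, ylo, yhi, xj, xhi) := by
                simp [pvFillStep, hx, h1, h2]
              rw [hstepA, hmin, hmax, hsplit, List.foldl_append,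
                foldl_add_of_mem (PySem.List.pyRange xlo (x + 1) 1) (fun t => (t, yj)) _
                  (fun t ht => by
                  rw [PySem.List.mem_pyRange_one] at ht
                  rw [PySem.Set.mem_foldl_add]
                  exact Or.inl (hsx t (by omega) (by omega))), hB]
              apply ih _ ylo yhi xj xhi hyl hyh (by omega) hxh
              · intro t htl hth
                rw [PySem.Set.mem_foldl_add]
                exact Or.inl (hsy t htl hth)
              · intro t htl hth
                rw [PySem.Set.mem_foldl_add]
                by_cases hc : xlo ≤ t
                · exact Or.inl (hsx t hc hth)
                · exact Or.inr ⟨t, PySem.List.mem_pyRange_one.mpr ⟨by omega, by omega⟩, rfl⟩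
            · have hB : pvFillStep x yj (s, ylo, yhi, xlo, xhi) (xj, yj)
                  = (s, ylo, yhi, xlo, xhi) := by
                simp [pvFillStep, hx, h1, h2]
              rw [hstepA, foldl_add_of_mem (PySem.List.pyRange (min x xj) (max x xj + 1) 1)
                (fun t => (t, yj)) s (fun t ht => by
                rw [PySem.List.mem_pyRange_one] at ht
                rcases le_total x xj with hc | hc
                · rw [min_eq_left hc, max_eq_right hc] at ht
                  exact hsx t (by omega) (by omega)
                · rw [min_eq_right hc, max_eq_left hc] at ht
                  exact hsx t (by omega) (by omega)), hB]
              exact ih s ylo yhi xlo xhi hyl hyh hxl hxh hsy hsx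
        · have hstepA : stepA (x, y) s (xj, yj) = s := by
            simp [stepA, pvLineA, Ne.symm hx, Ne.symm hy]
          have hB : pvFillStep x y (s, ylo, yhi, xlo, xhi) (xj, yj)
              = (s, ylo, yhi, xlo, xhi) := by
            simp [pvFillStep, hx, hy]
          rw [hstepA, hB]
          exact ih s ylo yhi xlo xhi hyl hyh hxl hxh hsy hsx

lemma stepA_self (x y : Int) (s : PySem.Set (Int × Int)) :
    stepA (x, y) s (x, y) = PySem.Set.add s (x, y) := by
  simp [stepA, pvLineA, pvRangeA, PySem.List.pyRange_one_singleton]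

lemma outerA_eq_pvFill (per : List (Int × Int)) (s : PySem.Set (Int × Int)) :
    outerA per s = pvFill per s := by
  induction per generalizing s with
  | nil => rfl
  | cons q rest ih =>
      obtain ⟨x, y⟩ := q
      rw [outerA, pvFill, List.foldl_cons, stepA_self,
        block_eq x y rest (PySem.Set.add s (x, y)) y y x x le_rfl le_rfl le_rfl le_rfl
          (fun t h1 h2 => by
            have : t = y := le_antisymm h2 h1
            subst this
            exact (PySem.Set.mem_add _ _ _).mpr (Or.inr rfl))
          (fun t h1 h2 => by
            have : t = x := le_antisymm h2 h1
            subst this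
            exact (PySem.Set.mem_add _ _ _).mpr (Or.inr rfl)), ih]

lemma stepB_fst_mono (x y : Int) (st : PySem.Set (Int × Int) × Int × Int × Int × Int)
    (q p : Int × Int) (h : p ∈ st.1) : p ∈ (pvFillStep x y st q).1 := by
  unfold pvFillStep
  split_ifs <;> first
    | exact h
    | (simp only [PySem.Set.mem_foldl_add]; exact Or.inl h)

lemma foldl_stepB_fst_mono (x y : Int) (l : List (Int × Int))
    (st : PySem.Set (Int × Int) × Int × Int × Int × Int) (p : Int × Int)
    (h : p ∈ st.1) : p ∈ (l.foldl (pvFillStep x y) st).1 := by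
  induction l generalizing st with
  | nil => exact h
  | cons q l ih => exact ih _ (stepB_fst_mono x y st q p h)

lemma mem_pvFill_of_mem (per : List (Int × Int)) (s : PySem.Set (Int × Int))
    (p : Int × Int) (h : p ∈ s) : p ∈ pvFill per s := by
  induction per generalizing s with
  | nil => exact h
  | cons q rest ih =>
      obtain ⟨x, y⟩ := q
      exact ih _ (foldl_stepB_fst_mono x y rest _ p ((PySem.Set.mem_add _ _ _).mpr (Or.inl h)))

lemma mem_pvFill_self (per : List (Int × Int)) (s : PySem.Set (Int × Int))
    (p : Int × Int) (h : p ∈ per) : p ∈ pvFill per s := by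
  induction per generalizing s with
  | nil => cases h
  | cons q rest ih =>
      obtain ⟨x, y⟩ := q
      rcases List.mem_cons.mp h with h | h
      · subst h
        exact mem_pvFill_of_mem rest _ _
          (foldl_stepB_fst_mono x y rest _ _ ((PySem.Set.mem_add _ _ _).mpr (Or.inr rfl)))
      · exact ih _ h

lemma union_of_subset (s t : PySem.Set (Int × Int)) (h : ∀ p ∈ t, p ∈ s) :
    PySem.Set.union s t = s := by
  rw [show PySem.Set.union s t = PySem.Set.update s t from rfl,
    PySem.Set.update_eq_append_filter]
  have : (PySem.Set.ofList t).filter (fun y => !(PySem.Set.contains s y)) = [] := by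
    apply List.filter_eq_nil_iff.mpr
    intro a ha
    simp
    exact h a ((PySem.Set.mem_ofList t a).mp ha)
  rw [this, List.append_nil]

def perC (coords : List (Int × Int)) : List (Int × Int) :=
  ((PySem.List.pyGetD coords (-1) (0, 0) :: coords).zip coords).flatMap
    (fun pq => pvLineA pq.1 pq.2)

lemma portA_eq (coords : List (Int × Int)) :
    getRestrictedCoords coords = pvFill (perC coords) [] := by
  simp only [getRestrictedCoords]
  have hfun : (fun (st : List (Int × Int) × (Int × Int)) coord =>
        ((pvLineA st.2 coord).foldl (fun l c => l ++ [c]) st.1, coord))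
      = (fun (st : List (Int × Int) × (Int × Int)) coord =>
        (st.1 ++ pvLineA st.2 coord, coord)) := by
    funext st coord
    simp only [PySem.List.foldl_append_singleton_eq_self]
  rw [hfun, perA_fold, List.nil_append, ← perC]
  have h0 := outer_idx (perC coords) 0 (Nat.zero_le _) PySem.Set.empty
  simp only [Nat.cast_zero, List.drop_zero] at h0
  rw [h0, outerA_eq_pvFill]
  exact union_of_subset _ _ (fun p hp =>
    mem_pvFill_self _ _ _ ((PySem.Set.mem_ofList _ _).mp hp))

lemma portB_eq (coords : List (Int × Int)) (h : coords ≠ []) :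
    getRestrictedCoords_alt coords = pvFill (perC coords) [] := by
  simp only [getRestrictedCoords_alt]
  rw [PySem.List.slice_from_neg_one, PySem.List.slice_to_neg_one,
    drop_pred_eq_getLast coords h, List.singleton_append, zip_cons_dropLast,
    show (fun (pq : (Int × Int) × (Int × Int)) => pvLineB pq.1 pq.2)
      = fun pq => pvLineA pq.1 pq.2 from funext fun pq => (pvLine_eq _ _).symm]
  rw [perC, PySem.List.pyGetD_neg_one coords ((0 : Int), (0 : Int)) h]
  rfl

-- ===== VERDICT (by name: the statement is the Claim_ definition above) =====
theorem getRestrictedCoords_spec : Claim_equal_getRestrictedCoords := by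
  intro coords _ hpre
  unfold Spec_getRestrictedCoords
  rw [portA_eq coords, portB_eq coords hpre]
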